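-- pv_equiv track=rewrite | github.com/GBrambila/KingdomCome2DiceQL | dice_env.py | canonical_action
-- ===== SOURCE A (Python) =====
-- def canonical_action(current_roll, move_tuple, decision_bit):
--     """
--     Dado:
--       - current_roll: lista dos dados atuais (na ordem rolada),
--       - move_tuple: tupla (ordenada) representando a combinação selecionada (ex.: (5,5)),
--       - decision_bit: 0 para "continuar", 1 para "parar".
--
--     Retorna o inteiro canônico (7 bits) que representa essa ação.
--     Para isso, escolhe-se os índices mais à esquerda (primeiras ocorrências) para representar o move_tuple.
--     """
--     chosen_indices = []
--     used = [False] * len(current_roll)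
--     for value in move_tuple:
--         for i, die in enumerate(current_roll):
--             if not used[i] and die == value:
--                 used[i] = True
--                 chosen_indices.append(i)
--                 break
--     canonical_mask = 0
--     for i in chosen_indices:
--         canonical_mask |= (1 << i)
--     return (decision_bit << 6) | canonical_mask
-- ===== SOURCE B (Python) =====
-- def canonical_action(current_roll, move_tuple, decision_bit):
--     # Build once: each die value -> queue of its indices in roll order,
--     # then consume the leftmost index per requested value (skip silently if exhausted).
--     positions = {}
--     for i, die in enumerate(current_roll):
--         positions.setdefault(die, []).append(i)
--     canonical_mask = 0
--     for value in move_tuple: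
--         idxs = positions.get(value)
--         if idxs:
--             canonical_mask |= 1 << idxs.pop(0)
--     return (decision_bit << 6) | canonical_mask
-- ===== Notes on version B (the rewrite author's own statement) =====
-- stated objective: faster
-- what changed: Replaces A's per-value left-to-right rescan of current_roll with a used[] array by one index build (value -> queue of indices) followed by O(1) leftmost-index pops, accumulating the mask inline instead of collecting chosen indices first.
import Mathlib
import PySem

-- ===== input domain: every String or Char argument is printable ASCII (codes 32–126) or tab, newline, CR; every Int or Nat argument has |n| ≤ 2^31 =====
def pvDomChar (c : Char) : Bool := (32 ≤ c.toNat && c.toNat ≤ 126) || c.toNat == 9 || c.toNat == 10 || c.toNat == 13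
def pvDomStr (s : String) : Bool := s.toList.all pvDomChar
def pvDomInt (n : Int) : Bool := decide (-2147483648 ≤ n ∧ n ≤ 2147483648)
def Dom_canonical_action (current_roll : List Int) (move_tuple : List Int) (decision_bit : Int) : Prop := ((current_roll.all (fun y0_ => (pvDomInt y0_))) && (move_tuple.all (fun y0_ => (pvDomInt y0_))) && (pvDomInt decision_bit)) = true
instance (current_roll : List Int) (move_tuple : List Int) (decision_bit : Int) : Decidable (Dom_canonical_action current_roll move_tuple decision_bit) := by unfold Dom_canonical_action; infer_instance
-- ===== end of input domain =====

-- B replaces A's per-value rescan of current_roll (with a used[] array) by one value->index-queue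
-- build plus leftmost pops, accumulating the mask inline (objective: faster, asymptotic).

-- ===== PORT A =====
-- the test of A's inner loop: 'not used[i] and die == value' (p = (i, die))
def caPred (used : List Bool) (v : Int) (p : Int × Int) : Bool :=
  (!(PySem.List.pyGetD used p.1 true)) && (p.2 == v)

-- A's inner 'for i, die in enumerate(current_roll): … break' loop: returns the updated
-- used list and the appended index (none when no die matched; enumerate index i ≥ 0, so
-- .toNat for used[i] = True is exact)
def caFind (used : List Bool) (v : Int) : List (Int × Int) → List Bool × Option Int
  | [] => (used, none)
  | p :: rest =>
    if caPred used v p then (used.set p.1.toNat true, some p.1)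
    else caFind used v rest

-- A's final mask loop over chosen_indices (indices come from enumerate, hence ≥ 0: .toNat exact)
def caMask (chosen : List Int) : Int :=
  chosen.foldl (fun m i => Int.lor m (Int.shiftLeft 1 i.toNat)) 0

def canonical_action (current_roll : List Int) (move_tuple : List Int) (decision_bit : Int) : Int :=
  let st := move_tuple.foldl (fun (st : List Bool × List Int) v =>
      match caFind st.1 v (PySem.List.enumerate current_roll 0) with
      | (u, some i) => (u, st.2 ++ [i])
      | (u, none) => (u, st.2))
    (List.replicate current_roll.length false, [])
  Int.lor (Int.shiftLeft decision_bit 6) (caMask st.2)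

-- ===== PORT B =====
-- Source B: positions = {}; for i, die in enumerate(current_roll): positions.setdefault(die, []).append(i)
-- (setdefault+append = modify die [] (· ++ [i])); then pop leftmost per move value, OR into the mask.
def canonical_action_alt (current_roll : List Int) (move_tuple : List Int) (decision_bit : Int) : Int :=
  let positions := (PySem.List.enumerate current_roll 0).foldl
      (fun d p => d.modify p.2 [] (fun l => l ++ [p.1])) PySem.Dict.empty
  let st := move_tuple.foldl (fun (st : PySem.Dict Int (List Int) × Int) v =>
      match st.1.getD v [] with
      | [] => st
      | i :: rest => (st.1.insert v rest, Int.lor st.2 (Int.shiftLeft 1 i.toNat)))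
    (positions, 0)
  Int.lor (Int.shiftLeft decision_bit 6) st.2

-- ===== PRECONDITION & SPEC =====
def Spec_canonical_action (current_roll : List Int) (move_tuple : List Int) (decision_bit : Int) (out : Int) : Prop := out = canonical_action_alt current_roll move_tuple decision_bit
instance (current_roll : List Int) (move_tuple : List Int) (decision_bit : Int) (out : Int) : Decidable (Spec_canonical_action current_roll move_tuple decision_bit out) := by unfold Spec_canonical_action; infer_instance

-- ===== CLAIM (what is proved, stated in full; the proofs are below) =====
def Claim_equal_canonical_action : Prop := ∀ (current_roll : List Int) (move_tuple : List Int) (decision_bit : Int), Dom_canonical_action current_roll move_tuple decision_bit → Spec_canonical_action current_roll move_tuple decision_bit (canonical_action current_roll move_tuple decision_bit)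

-- ===== LEMMAS AND PROOFS =====

theorem caFind_eq_filter (used : List Bool) (v : Int) (l : List (Int × Int)) :
    caFind used v l = (match l.filter (caPred used v) with
      | [] => (used, none)
      | p :: _ => (used.set p.1.toNat true, some p.1)) := by
  induction l with
  | nil => rfl
  | cons p rest ih =>
    by_cases h : caPred used v p = true
    · simp [caFind, h]
    · simp only [Bool.not_eq_true] at h
      simp [caFind, h, ih]

theorem caMask_append (chosen : List Int) (i : Int) :
    caMask (chosen ++ [i]) = Int.lor (caMask chosen) (Int.shiftLeft 1 i.toNat) := by
  simp [caMask, List.foldl_append]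

-- indices in enumerate roll 0 are the casts of their Nat positions, and fst determines the pair
theorem enum_fst_cast {roll : List Int} {p : Int × Int}
    (hp : p ∈ PySem.List.enumerate roll 0) :
    ∃ (k : Nat) (h : k < roll.length), p = ((k : Int), roll[k]) := by
  rcases (PySem.List.mem_enumerate_iff roll 0 p).1 hp with ⟨k, h, hk⟩
  exact ⟨k, h, by simpa using hk⟩

theorem pyGetD_set_cast (used : List Bool) (n k : Nat) (hn : n < used.length)
    (_hk : k < used.length) (d : Bool) :
    PySem.List.pyGetD (used.set n true) (k : Int) d
      = (if k = n then true else PySem.List.pyGetD used (k : Int) d) := by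
  simp only [PySem.List.pyGetD_natCast]
  rcases eq_or_ne k n with h | h
  · simp [h, List.getD, hn]
  · simp [List.getD, h, (Ne.symm h)]

-- after marking index n used, the available-pair predicate gains the conjunct fst ≠ n
theorem caPred_set (roll : List Int) (used : List Bool) (hlen : used.length = roll.length)
    (n : Nat) (hn : n < roll.length) (v' : Int) (q : Int × Int)
    (hq : q ∈ PySem.List.enumerate roll 0) :
    caPred (used.set n true) v' q = (caPred used v' q && (q.1 != (n : Int))) := by
  rcases enum_fst_cast hq with ⟨k, hk, rfl⟩
  have := pyGetD_set_cast used n k (hlen ▸ hn) (hlen ▸ hk) true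
  simp only [caPred, this]
  rcases eq_or_ne k n with h | h
  · subst h
    simp
  · have hne : (((k : Int)) != ((n : Int))) = true := by simp [h]
    simp [if_neg h, hne]

theorem loop_eq (roll : List Int) (mt : List Int) (used : List Bool) (chosen : List Int)
    (d : PySem.Dict Int (List Int)) (m : Int)
    (hlen : used.length = roll.length)
    (hinv : ∀ v, d.getD v [] =
        ((PySem.List.enumerate roll 0).filter (caPred used v)).map (·.1))
    (hm : m = caMask chosen) :
    caMask (mt.foldl (fun (st : List Bool × List Int) v =>
        match caFind st.1 v (PySem.List.enumerate roll 0) with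
        | (u, some i) => (u, st.2 ++ [i])
        | (u, none) => (u, st.2)) (used, chosen)).2
    = (mt.foldl (fun (st : PySem.Dict Int (List Int) × Int) v =>
        match st.1.getD v [] with
        | [] => st
        | i :: rest => (st.1.insert v rest, Int.lor st.2 (Int.shiftLeft 1 i.toNat))) (d, m)).2 := by
  induction mt generalizing used chosen d m with
  | nil => simpa using hm.symm
  | cons v mt ih =>
    simp only [List.foldl_cons]
    rw [caFind_eq_filter]
    rcases hF : (PySem.List.enumerate roll 0).filter (caPred used v) with _ | ⟨p, rest⟩
    · rw [hinv v, hF]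
      exact ih used chosen d m hlen hinv hm
    · rw [hinv v, hF]
      simp only [List.map_cons]
      -- p comes from enumerate: p.1 = ↑kp, p.2 = roll[kp] with roll[kp] = v (from the filter hit)
      have hpmem : p ∈ (PySem.List.enumerate roll 0).filter (caPred used v) := by
        rw [hF]; exact List.mem_cons_self
      have hpenum : p ∈ PySem.List.enumerate roll 0 := List.mem_of_mem_filter hpmem
      have hpv : p.2 == v := by
        have := List.of_mem_filter hpmem
        exact (Bool.and_elim_right this)
      rcases enum_fst_cast hpenum with ⟨kp, hkp, hpeq⟩
      -- the filtered list has strictly increasing (hence distinct) fst components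
      have hpw : ((PySem.List.enumerate roll 0).filter (caPred used v)).Pairwise
          (fun a b => a.1 < b.1) :=
        (PySem.List.pairwise_lt_enumerate roll 0).sublist List.filter_sublist
      have hrest_ne : ∀ q ∈ rest, q.1 ≠ p.1 := by
        intro q hq
        have := (List.pairwise_cons.1 (hF ▸ hpw)).1 q hq
        omega
      apply ih
      · simpa using hlen
      · -- the new dict still lists exactly the available indices per value
        intro v'
        have hfilt : (PySem.List.enumerate roll 0).filter (caPred (used.set p.1.toNat true) v')
            = ((PySem.List.enumerate roll 0).filter (caPred used v')).filter
                (fun q => q.1 != p.1) := by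
          rw [List.filter_filter]
          apply List.filter_congr
          intro q hq
          have := caPred_set roll used hlen kp hkp v' q hq
          rw [hpeq]
          simpa [Bool.and_comm] using this
        rw [PySem.Dict.getD_insert]
        rcases eq_or_ne v' v with rfl | hne
        · rw [if_pos rfl, hfilt, hF]
          have hdrop : (p :: rest).filter (fun q => q.1 != p.1) = rest := by
            rw [List.filter_cons, if_neg (by simp)]
            exact List.filter_eq_self.2 (fun q hq => by simpa using hrest_ne q hq)
          rw [hdrop]
        · rw [if_neg hne, hinv v', hfilt]
          congr 1
          refine (List.filter_eq_self.2 ?_).symm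
          intro q hq
          -- q available for v' ≠ v cannot sit at p's index, whose die equals v
          have hqenum : q ∈ PySem.List.enumerate roll 0 := List.mem_of_mem_filter hq
          have hqP : caPred used v' q = true := List.of_mem_filter hq
          have hqv' : q.2 == v' := Bool.and_elim_right hqP
          rcases enum_fst_cast hqenum with ⟨kq, hkq, hqeq⟩
          simp only [bne_iff_ne, ne_eq]
          intro hqp
          have hkk : kq = kp := by
            have hc : (kq : Int) = (kp : Int) := by
              rw [hqeq, hpeq] at hqp; simpa using hqp
            exact_mod_cast hc
          subst hkk
          apply hne
          have h2 : q.2 = p.2 := by rw [hqeq, hpeq]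
          have hv' := eq_of_beq hqv'
          have hv := eq_of_beq hpv
          rw [← hv', h2, hv]
      · rw [hm, caMask_append]

-- the dict built by B's first loop lists, per value, exactly the indices available initially
theorem build_inv (roll : List Int) (v : Int) :
    ((PySem.List.enumerate roll 0).foldl
        (fun d p => d.modify p.2 [] (fun l => l ++ [p.1])) PySem.Dict.empty).getD v []
      = ((PySem.List.enumerate roll 0).filter
          (caPred (List.replicate roll.length false) v)).map (·.1) := by
  have h1 : (PySem.List.enumerate roll 0).foldl
        (fun d p => d.modify p.2 [] (fun l => l ++ [p.1])) PySem.Dict.empty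
      = ((PySem.List.enumerate roll 0).map Prod.swap).foldl
        (fun d p => d.modify p.1 [] (fun l => l ++ [p.2])) PySem.Dict.empty := by
    rw [List.foldl_map]; rfl
  rw [h1, PySem.Dict.getD_foldl_modify_append]
  simp only [PySem.Dict.getD_empty, List.nil_append, List.filter_map, List.map_map]
  have h2 : (PySem.List.enumerate roll 0).filter ((fun p => p.1 == v) ∘ Prod.swap)
      = (PySem.List.enumerate roll 0).filter (caPred (List.replicate roll.length false) v) := by
    apply List.filter_congr
    intro q hq
    rcases enum_fst_cast hq with ⟨k, hk, rfl⟩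
    simp [caPred, PySem.List.pyGetD_natCast, List.getD, hk]
  rw [h2]
  rfl

-- ===== VERDICT (by name: the statement is the Claim_ definition above) =====
theorem canonical_action_spec : Claim_equal_canonical_action := by
  intro roll mt db _
  show canonical_action roll mt db = canonical_action_alt roll mt db
  unfold canonical_action canonical_action_alt
  have hinv0 : ∀ v, ((PySem.List.enumerate roll 0).foldl
      (fun d p => d.modify p.2 [] (fun l => l ++ [p.1])) PySem.Dict.empty).getD v []
      = ((PySem.List.enumerate roll 0).filter
          (caPred (List.replicate roll.length false) v)).map (·.1) :=
    fun v => build_inv roll v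
  exact congrArg (Int.lor (Int.shiftLeft db 6))
    (loop_eq roll mt (List.replicate roll.length false) [] _ 0 (by simp) hinv0 rfl)
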